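-- pv_equiv track=rewrite | github.com/Saeed-beepboop/parsing_docs | streamlit_june5.py | query
-- ===== SOURCE A (Python) =====
-- def query(term:str, processed_doc:list):
-- # def separate_interview_sentences(processed_doc:list, term:str):
--     questions_and_answers = []
--     current_question = None
--     current_answer = None
--
--     for sentence in processed_doc:
--         # Remove leading/trailing whitespaces
--         sentence = sentence.strip()
--
--         # If the sentence ends with a question mark or a colon,
--         # it's likely a question
--         # if sentence.endswith('?') or sentence.endswith(':'):
--         # for para_num in range(0,len(processed_doc)):
--         if sentence.startswith('I:'):
--         # if "I:" in processed_doc[para_num]: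
--             # sentence = processed_doc[para_num]
--             # If there was a previous question, add it to the list with its answer
--             if current_question:
--                 questions_and_answers.append((current_question, current_answer))
--             # Set the new question
--             current_question = sentence
--             # Reset the current answer
--             current_answer = None
--         # Otherwise, it's likely an answer to the previous question
--         else:
--             # If there's no question yet, skip this sentence
--             if not current_question:
--                 continue
--             # If there's no answer yet, initialize it with this sentence
--             if current_answer is None:
--                 current_answer = sentence
--             # If there's already an answer, concatenate this sentence to it
--             else:
--                 current_answer += ' ' + sentence
--
--     # Add the last question and its answer to the list
--     if current_question:
--         questions_and_answers.append((current_question, current_answer))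
--
--     # return questions_and_answers
--     i_term = []
--     p_term = []
--     for phrase_number in range(0,len(questions_and_answers)):
--         if term in questions_and_answers[phrase_number][0]:
--             # i_term.append(i_list[phrase_number])
--             # p_term.append(p_list[phrase_number])
--             i_term.append(questions_and_answers[phrase_number][0])
--             p_term.append(questions_and_answers[phrase_number][1])
--     return i_term, p_term
-- ===== SOURCE B (Python) =====
-- def query(term: str, processed_doc: list):
--     # Single streaming pass: no intermediate (question, answer) pair list.
--     i_term, p_term = [], []
--     cur_q, parts = None, []
--
--     def _flush(q, ps):
--         if q is not None and term in q:
--             i_term.append(q)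
--             p_term.append(' '.join(ps) if ps else None)
--
--     for s in processed_doc:
--         s = s.strip()
--         if s.startswith('I:'):
--             _flush(cur_q, parts)
--             cur_q, parts = s, []
--         elif cur_q is not None:
--             parts.append(s)
--     _flush(cur_q, parts)
--     return i_term, p_term
-- ===== Notes on version B (the rewrite author's own statement) =====
-- stated objective: simpler
-- what changed: Replaced A's two-phase scheme (build a full (question, answer) pair list, then an index loop filtering it) by a single streaming pass that keeps only the current question and its answer parts and emits matching Q/A pairs as each group closes, joining the parts once at flush time.
import Mathlib
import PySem

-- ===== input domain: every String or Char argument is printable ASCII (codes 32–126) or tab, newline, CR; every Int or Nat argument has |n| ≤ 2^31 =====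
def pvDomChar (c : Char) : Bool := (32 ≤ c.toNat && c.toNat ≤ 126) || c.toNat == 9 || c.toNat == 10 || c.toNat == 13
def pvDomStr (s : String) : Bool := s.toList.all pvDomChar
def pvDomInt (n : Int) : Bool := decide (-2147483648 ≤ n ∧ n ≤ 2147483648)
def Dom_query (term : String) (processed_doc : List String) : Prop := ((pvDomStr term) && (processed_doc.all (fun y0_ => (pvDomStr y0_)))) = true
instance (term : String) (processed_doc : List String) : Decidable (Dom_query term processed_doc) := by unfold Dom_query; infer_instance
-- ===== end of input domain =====

-- B replaces A's build-pair-list-then-filter-by-index scheme by one streaming pass that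
-- keeps only the current question and its answer parts, flushing each group as it closes (simpler).

-- ===== PORT A =====
-- Python str concatenation a + b (exact: code points appended)
def pyCat (a b : String) : String := String.ofList (a.toList ++ b.toList)

-- Python truthiness of an Optional[str]: None and '' are falsy
def optTruthy (o : Option String) : Bool :=
  match o with
  | none => false
  | some s => !(PySem.Str.len s == 0)

-- one iteration of A's first for-loop; state = (questions_and_answers, current_question, current_answer)
def queryStepA (st : List (String × Option String) × Option String × Option String)
    (sentence : String) : List (String × Option String) × Option String × Option String :=
  let s := PySem.Str.strip sentence
  if PySem.Str.startswith s "I:" then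
    let qas := if optTruthy st.2.1 then st.1 ++ [(st.2.1.getD "", st.2.2)] else st.1
    (qas, some s, none)
  else
    if !optTruthy st.2.1 then st
    else
      match st.2.2 with
      | none => (st.1, st.2.1, some s)
      | some a => (st.1, st.2.1, some (pyCat (pyCat a " ") s))

def query (term : String) (processed_doc : List String) : List String × List (Option String) :=
  let st := processed_doc.foldl queryStepA ([], none, none)
  let qas := if optTruthy st.2.1 then st.1 ++ [(st.2.1.getD "", st.2.2)] else st.1
  (PySem.List.pyRange 0 (qas.length : Int)).foldl
    (fun (acc : List String × List (Option String)) i =>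
      let qa := PySem.List.pyGetD qas i ("", none)
      if PySem.Str.isIn term qa.1 then (acc.1 ++ [qa.1], acc.2 ++ [qa.2]) else acc)
    ([], [])

-- ===== PORT B =====
-- B's _flush: emit (cur_q, ' '.join(parts) or None) when cur_q is set and term occurs in it
def queryFlushB (term : String) (i : List String) (p : List (Option String))
    (cq : Option String) (parts : List String) : List String × List (Option String) :=
  match cq with
  | none => (i, p)
  | some q =>
    if PySem.Str.isIn term q then
      (i ++ [q], p ++ [match parts with
                       | [] => none
                       | _ :: _ => some (PySem.Str.join " " parts)])
    else (i, p)

-- one iteration of B's loop; state = ((i_term, p_term), cur_q, parts)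
def queryStepB (term : String)
    (st : (List String × List (Option String)) × Option String × List String)
    (sentence : String) : (List String × List (Option String)) × Option String × List String :=
  let s := PySem.Str.strip sentence
  if PySem.Str.startswith s "I:" then
    (queryFlushB term st.1.1 st.1.2 st.2.1 st.2.2, some s, [])
  else
    match st.2.1 with
    | none => st
    | some _ => (st.1, st.2.1, st.2.2 ++ [s])

def query_alt (term : String) (processed_doc : List String) : List String × List (Option String) :=
  let st := processed_doc.foldl (queryStepB term) (([], []), none, [])
  queryFlushB term st.1.1 st.1.2 st.2.1 st.2.2

-- ===== PRECONDITION & SPEC =====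
def Spec_query (term : String) (processed_doc : List String) (out : List String × List (Option String)) : Prop := out = query_alt term processed_doc
instance (term : String) (processed_doc : List String) (out : List String × List (Option String)) : Decidable (Spec_query term processed_doc out) := by unfold Spec_query; infer_instance

-- ===== CLAIM (what is proved, stated in full; the proofs are below) =====
def Claim_equal_query : Prop := ∀ (term : String) (processed_doc : List String), Dom_query term processed_doc → Spec_query term processed_doc (query term processed_doc)

-- ===== LEMMAS AND PROOFS =====

-- A's current_answer as a function of B's parts list
def joinOpt (parts : List String) : Option String :=
  match parts with
  | [] => none
  | _ :: _ => some (PySem.Str.join " " parts)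

-- what A's final index loop computes from a pair list
def filterPair (term : String) (qas : List (String × Option String)) :
    List String × List (Option String) :=
  ((qas.filter (fun qa => PySem.Str.isIn term qa.1)).map (·.1),
   (qas.filter (fun qa => PySem.Str.isIn term qa.1)).map (·.2))

-- the invariant on current_question: whenever set, it is a nonempty string
def InvQ (cq : Option String) : Prop := ∀ q, cq = some q → q.toList ≠ []

lemma optTruthy_some {q : String} (h : q.toList ≠ []) : optTruthy (some q) = true := by
  simp [optTruthy, PySem.Str.len_eq]
  intro he
  subst he
  exact h rfl

lemma startswith_ne_nil {s : String} (h : PySem.Str.startswith s "I:" = true) :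
    s.toList ≠ [] := by
  rw [PySem.Str.startswith_eq, PySem.Chars.startswith_iff] at h
  intro hnil
  rw [hnil] at h
  simp at h

lemma joinOpt_append (parts : List String) (s : String) :
    (match joinOpt parts with
     | none => some s
     | some a => some (pyCat (pyCat a " ") s)) = joinOpt (parts ++ [s]) := by
  match parts with
  | [] =>
    simp only [joinOpt, List.nil_append]
    exact congrArg some (String.toList_inj.mp (by
      simp [PySem.Str.toList_join, PySem.Chars.join_singleton])).symm
  | p :: rest =>
    simp only [joinOpt]
    apply congrArg
    apply String.toList_inj.mp
    simp only [pyCat]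
    simp only [PySem.Str.toList_join, String.toList_ofList]
    induction rest generalizing p with
    | nil => simp [PySem.Chars.join_singleton, PySem.Chars.join_cons_cons]
    | cons q rest ih =>
      simp only [List.cons_append, List.map_cons, PySem.Chars.join_cons_cons] at *
      rw [← ih q]
      simp

lemma filter_foldl (term : String) (qas : List (String × Option String))
    (i : List String) (p : List (Option String)) :
    qas.foldl
      (fun (acc : List String × List (Option String)) qa =>
        if PySem.Str.isIn term qa.1 then (acc.1 ++ [qa.1], acc.2 ++ [qa.2]) else acc)
      (i, p)
    = (i ++ (filterPair term qas).1, p ++ (filterPair term qas).2) := by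
  induction qas generalizing i p with
  | nil => simp [filterPair]
  | cons qa rest ih =>
    simp only [List.foldl_cons]
    by_cases h : PySem.Str.isIn term qa.1 = true
    · rw [if_pos h, ih]
      simp only [PySem.Str.isIn_eq] at h
      simp [filterPair, h]
    · rw [if_neg h, ih]
      simp only [Bool.not_eq_true, PySem.Str.isIn_eq] at h
      simp [filterPair, h]

-- finalization: A appends the pending pair (under truthiness) and filters; B flushes
lemma flush_eq_filter_finalize (term : String) (qas : List (String × Option String))
    (cq : Option String) (parts : List String) (hq : InvQ cq) :
    queryFlushB term (filterPair term qas).1 (filterPair term qas).2 cq parts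
    = filterPair term
        (if optTruthy cq then qas ++ [(cq.getD "", joinOpt parts)] else qas) := by
  match cq with
  | none => simp [queryFlushB, optTruthy]
  | some q =>
    have hne : q.toList ≠ [] := hq q rfl
    rw [optTruthy_some hne, if_pos rfl]
    simp only [queryFlushB, Option.getD_some]
    by_cases h : PySem.Str.isIn term q = true
    · rw [if_pos h]
      simp only [PySem.Str.isIn_eq] at h
      simp [filterPair, h, joinOpt]
    · rw [if_neg h]
      simp only [Bool.not_eq_true, PySem.Str.isIn_eq] at h
      simp [filterPair, h]

-- main loop invariant: A's state and B's state stay related throughout the fold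
lemma loop_rel (term : String) (doc : List String) :
    ∀ (qas : List (String × Option String)) (cq : Option String) (parts : List String),
      InvQ cq →
      ∃ (qas' : List (String × Option String)) (cq' : Option String) (parts' : List String),
        doc.foldl queryStepA (qas, cq, joinOpt parts) = (qas', cq', joinOpt parts') ∧
        doc.foldl (queryStepB term) (filterPair term qas, cq, parts)
          = (filterPair term qas', cq', parts') ∧
        InvQ cq' := by
  induction doc with
  | nil => exact fun qas cq parts hq => ⟨qas, cq, parts, rfl, rfl, hq⟩
  | cons sentence rest ih =>
    intro qas cq parts hq
    simp only [List.foldl_cons]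
    by_cases hI : PySem.Str.startswith (PySem.Str.strip sentence) "I:" = true
    · have hI' : PySem.Chars.startswith (PySem.Chars.strip sentence.toList) ['I', ':'] = true := by
        simpa using hI -- a new question: A appends the pending pair, B flushes it
      have hstepA : queryStepA (qas, cq, joinOpt parts) sentence
          = ((if optTruthy cq then qas ++ [(cq.getD "", joinOpt parts)] else qas),
             some (PySem.Str.strip sentence), none) := by
        simp [queryStepA, hI']
      have hstepB : queryStepB term (filterPair term qas, cq, parts) sentence
          = (filterPair term
              (if optTruthy cq then qas ++ [(cq.getD "", joinOpt parts)] else qas),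
             some (PySem.Str.strip sentence), []) := by
        simp only [queryStepB]
        rw [if_pos (by simpa using hI')]
        rw [flush_eq_filter_finalize term qas cq parts hq]
      rw [hstepA, hstepB]
      have : (none : Option String) = joinOpt [] := rfl
      rw [this]
      exact ih _ _ [] (fun q hqeq => by
        injection hqeq with h'
        rw [← h']
        exact startswith_ne_nil hI)
    · -- an answer sentence
      have hI' : PySem.Chars.startswith (PySem.Chars.strip sentence.toList) ['I', ':'] = false := by
        simpa [Bool.not_eq_true] using hI
      match cq with
      | none =>
        have hstepA : queryStepA (qas, none, joinOpt parts) sentence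
            = (qas, none, joinOpt parts) := by
          simp [queryStepA, hI', optTruthy]
        have hstepB : queryStepB term (filterPair term qas, none, parts) sentence
            = (filterPair term qas, none, parts) := by
          simp [queryStepB, hI']
        rw [hstepA, hstepB]
        exact ih qas none parts hq
      | some q =>
        have hne : q.toList ≠ [] := hq q rfl
        have hstepA : queryStepA (qas, some q, joinOpt parts) sentence
            = (qas, some q, joinOpt (parts ++ [PySem.Str.strip sentence])) := by
          rw [← joinOpt_append parts (PySem.Str.strip sentence)]
          simp [queryStepA, hI', optTruthy_some hne]
          cases joinOpt parts <;> rfl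
        have hstepB : queryStepB term (filterPair term qas, some q, parts) sentence
            = (filterPair term qas, some q, parts ++ [PySem.Str.strip sentence]) := by
          simp [queryStepB, hI']
        rw [hstepA, hstepB]
        exact ih qas (some q) (parts ++ [PySem.Str.strip sentence]) hq

-- ===== VERDICT (by name: the statement is the Claim_ definition above) =====
theorem query_spec : Claim_equal_query := by
  intro term doc _
  unfold Spec_query query query_alt
  obtain ⟨qas', cq', parts', hA, hB, hq'⟩ :=
    loop_rel term doc [] none [] (fun q h => by cases h)
  have h0 : (joinOpt [] : Option String) = none := rfl
  rw [show (([], none, none) : List (String × Option String) × Option String × Option String)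
        = ([], none, joinOpt []) from rfl, hA]
  have hB' : doc.foldl (queryStepB term) (([], []), none, []) = (filterPair term qas', cq', parts') := by
    rw [show ((([], []), none, []) :
          (List String × List (Option String)) × Option String × List String)
        = (filterPair term [], none, []) from rfl, hB]
  rw [hB']
  simp only
  rw [flush_eq_filter_finalize term qas' cq' parts' hq']
  generalize (if optTruthy cq' = true then qas' ++ [(cq'.getD "", joinOpt parts')] else qas') = qasF
  rw [PySem.List.foldl_pyRange_zero_pyGetD' qasF ("", none)
      (fun (acc : List String × List (Option String)) (qa : String × Option String) =>
        if PySem.Str.isIn term qa.1 = true then (acc.1 ++ [qa.1], acc.2 ++ [qa.2]) else acc)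
      ([], [])]
  rw [filter_foldl]
  simp
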